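-- pv_equiv track=rewrite | github.com/Todd-Sakai/C-S-303E-assignments | RecursiveFunctions.py | findLastUppercase
-- ===== SOURCE A (Python) =====
-- def findLastUppercase( s ):
--    """ Return the last uppercase letter in
--    string s, if any. Return None if there
--    is none. """
--    if not s:
--        return None
--    else:
--        res = findLastUppercase(s[1:])
--        if res is not None:
--            return res
--        elif s[0].isupper():
--            return s[0]
--        else:
--            return None
-- ===== SOURCE B (Python) =====
-- def findLastUppercase(s):
--     """Return the last uppercase letter in string s, or None."""
--     res = None
--     for c in s:
--         if c.isupper():
--             res = c
--     return res
-- ===== Notes on version B (the rewrite author's own statement) =====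
-- stated objective: simpler
-- what changed: Replaces the O(n^2) recursion (which slices the string and checks the tail's result before the head) with a single forward loop carrying the last uppercase seen.
import Mathlib
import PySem

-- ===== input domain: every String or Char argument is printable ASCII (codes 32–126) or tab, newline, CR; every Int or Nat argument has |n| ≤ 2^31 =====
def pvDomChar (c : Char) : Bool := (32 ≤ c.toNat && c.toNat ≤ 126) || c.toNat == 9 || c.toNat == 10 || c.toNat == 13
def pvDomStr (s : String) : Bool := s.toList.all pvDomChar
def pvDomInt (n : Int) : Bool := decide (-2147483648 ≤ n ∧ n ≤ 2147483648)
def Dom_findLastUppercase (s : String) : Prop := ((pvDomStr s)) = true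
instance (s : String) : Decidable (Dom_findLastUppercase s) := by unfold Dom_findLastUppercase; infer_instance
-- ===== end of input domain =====

-- B replaces A's O(n^2) tail-first recursion by a single forward loop carrying the last uppercase seen.

-- ===== PORT A =====
-- A recurses on the tail (s[1:]) and prefers the tail's result over s[0].
def findLastUppercaseGo : List Char → Option String
  | [] => none
  | c :: rest =>
    match findLastUppercaseGo rest with
    | some r => some r
    | none => if PySem.Chars.isupper c then some (String.mk [c]) else none

def findLastUppercase (s : String) : Option String :=
  findLastUppercaseGo s.toList

-- ===== PORT B =====
-- forward scan: res := None; for c in s: if c.isupper(): res = c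
def findLastUppercase_alt (s : String) : Option String :=
  s.toList.foldl (fun res c => if PySem.Chars.isupper c then some (String.mk [c]) else res) none

-- ===== PRECONDITION & SPEC =====
def Spec_findLastUppercase (s : String) (out : Option String) : Prop := out = findLastUppercase_alt s
instance (s : String) (out : Option String) : Decidable (Spec_findLastUppercase s out) := by unfold Spec_findLastUppercase; infer_instance

-- ===== CLAIM (what is proved, stated in full; the proofs are below) =====
def Claim_equal_findLastUppercase : Prop := ∀ (s : String), Dom_findLastUppercase s → Spec_findLastUppercase s (findLastUppercase s)

-- ===== LEMMAS AND PROOFS =====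
-- The forward fold returns A's recursive result when there is one, else its accumulator.
theorem foldl_eq_go (l : List Char) : ∀ acc : Option String,
    l.foldl (fun res c => if PySem.Chars.isupper c then some (String.mk [c]) else res) acc
      = match findLastUppercaseGo l with
        | some r => some r
        | none => acc := by
  induction l with
  | nil => intro acc; simp [findLastUppercaseGo]
  | cons c rest ih =>
    intro acc
    simp only [List.foldl_cons, findLastUppercaseGo, ih]
    cases findLastUppercaseGo rest with
    | some r => simp
    | none => by_cases h : PySem.Chars.isupper c <;> simp [h]

-- ===== VERDICT (by name: the statement is the Claim_ definition above) =====
theorem findLastUppercase_spec : Claim_equal_findLastUppercase := by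
  intro s _
  unfold Spec_findLastUppercase findLastUppercase_alt findLastUppercase
  rw [foldl_eq_go]
  cases findLastUppercaseGo s.toList <;> rfl
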